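-- pv_equiv track=rewrite | github.com/MozartofCode/Poker-Smart-Contract | Backend/game.py | get_high_card
-- ===== SOURCE A (Python) =====
-- def get_high_card(cards):
--     ranks = []
--
--     for card in cards:
--         rank = card.split(" of ")[0]
--         ranks.append(rank)
--
--     if "Ace" in ranks:
--         return "Ace"
--
--     elif "King" in ranks:
--         return "King"
--
--     elif "Queen" in ranks:
--         return "Queen"
--
--     elif "Jack" in ranks:
--         return "Jack"
--
--     elif "10" in ranks:
--         return "10"
--
--     elif "9" in ranks:
--         return "9"
--
--     elif "8" in ranks:
--         return "8"
--
--     elif "7" in ranks: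
--         return "7"
--
--     elif "6" in ranks:
--         return "6"
--
--     elif "5" in ranks:
--         return "5"
--
--     elif "4" in ranks:
--         return "4"
--
--     elif "3" in ranks:
--         return "3"
--
--     elif "2" in ranks:
--         return "2"
-- ===== SOURCE B (Python) =====
-- def get_high_card(cards):
--     ORDER = {"2": 2, "3": 3, "4": 4, "5": 5, "6": 6, "7": 7, "8": 8,
--              "9": 9, "10": 10, "Jack": 11, "Queen": 12, "King": 13, "Ace": 14}
--     best_rank = None
--     best_val = 0
--     for card in cards:
--         rank = card.split(" of ")[0]
--         val = ORDER.get(rank, 0)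
--         if val > best_val:
--             best_rank, best_val = rank, val
--     return best_rank
-- ===== Notes on version B (the rewrite author's own statement) =====
-- stated objective: alternative
-- what changed: Replaced A's rank-list build plus 13 sequential membership scans (one per rank, highest first) by a single pass that keeps the best rank seen so far using a rank-to-value dictionary.
import Mathlib
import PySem

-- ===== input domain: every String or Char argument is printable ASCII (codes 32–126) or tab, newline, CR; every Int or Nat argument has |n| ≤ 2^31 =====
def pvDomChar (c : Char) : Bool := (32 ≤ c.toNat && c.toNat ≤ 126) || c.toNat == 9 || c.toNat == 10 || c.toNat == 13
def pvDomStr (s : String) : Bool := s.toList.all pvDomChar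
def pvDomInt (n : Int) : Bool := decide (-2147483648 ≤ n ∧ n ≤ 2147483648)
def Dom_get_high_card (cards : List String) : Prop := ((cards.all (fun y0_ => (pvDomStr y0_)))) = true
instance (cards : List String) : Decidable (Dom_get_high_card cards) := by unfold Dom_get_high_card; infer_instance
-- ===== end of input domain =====

-- B replaces A's 13 sequential membership scans of the rank list by a single pass that keeps the
-- best (rank, numeric value) seen so far, using a rank→value dict; same return value everywhere.
set_option maxRecDepth 8192

-- ===== PORT A =====
-- card.split(" of ")[0]: split? is some for a nonempty separator, and Python split always
-- returns a nonempty list, so index [0] is headD; this expression appears verbatim in both programs.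
def pvRank (card : String) : String := ((PySem.Str.split? card " of ").getD []).headD ""

def get_high_card (cards : List String) : Option String :=
  let ranks := cards.foldl (fun acc card => acc ++ [pvRank card]) []
  if "Ace" ∈ ranks then some "Ace"
  else if "King" ∈ ranks then some "King"
  else if "Queen" ∈ ranks then some "Queen"
  else if "Jack" ∈ ranks then some "Jack"
  else if "10" ∈ ranks then some "10"
  else if "9" ∈ ranks then some "9"
  else if "8" ∈ ranks then some "8"
  else if "7" ∈ ranks then some "7"
  else if "6" ∈ ranks then some "6"
  else if "5" ∈ ranks then some "5"
  else if "4" ∈ ranks then some "4"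
  else if "3" ∈ ranks then some "3"
  else if "2" ∈ ranks then some "2"
  else none

-- ===== PORT B =====
def pvOrder : PySem.Dict String Int := PySem.Dict.ofList
  [("2",2),("3",3),("4",4),("5",5),("6",6),("7",7),("8",8),("9",9),("10",10),
   ("Jack",11),("Queen",12),("King",13),("Ace",14)]

-- one loop iteration: update (best_rank, best_val) if this card's value beats best_val
def pvStep (acc : Option String × Int) (card : String) : Option String × Int :=
  let rank := pvRank card
  let v := PySem.Dict.getD pvOrder rank 0
  if acc.2 < v then (some rank, v) else acc

def get_high_card_alt (cards : List String) : Option String :=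
  (cards.foldl pvStep (none, 0)).1

-- ===== PRECONDITION & SPEC =====
def Spec_get_high_card (cards : List String) (out : Option String) : Prop := out = get_high_card_alt cards
instance (cards : List String) (out : Option String) : Decidable (Spec_get_high_card cards out) := by unfold Spec_get_high_card; infer_instance

-- ===== CLAIM (what is proved, stated in full; the proofs are below) =====
def Claim_equal_get_high_card : Prop := ∀ (cards : List String), Dom_get_high_card cards → Spec_get_high_card cards (get_high_card cards)

-- ===== LEMMAS AND PROOFS =====
-- the numeric value B assigns to a card (0 for unknown ranks)
def pvVOf (c : String) : Int := PySem.Dict.getD pvOrder (pvRank c) 0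
-- the canonical rank string for a value in 2..14, none otherwise
def pvName (v : Int) : Option String :=
  if v = 14 then some "Ace" else
  if v = 13 then some "King" else
  if v = 12 then some "Queen" else
  if v = 11 then some "Jack" else
  if v = 10 then some "10" else
  if v = 9 then some "9" else
  if v = 8 then some "8" else
  if v = 7 then some "7" else
  if v = 6 then some "6" else
  if v = 5 then some "5" else
  if v = 4 then some "4" else
  if v = 3 then some "3" else
  if v = 2 then some "2" else
  none

-- running maximum of pvVOf over the cards
def pvM (cs : List String) (v : Int) : Int := cs.foldl (fun m c => max m (pvVOf c)) v

lemma pvOrder_items : pvOrder.items =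
  [("2",2),("3",3),("4",4),("5",5),("6",6),("7",7),("8",8),("9",9),("10",10),
   ("Jack",11),("Queen",12),("King",13),("Ace",14)] := by decide

lemma pvVOf_eq_2 (c : String) : pvVOf c = 2 ↔ pvRank c = "2" := by
  simp only [pvVOf, PySem.Dict.getD, PySem.Dict.get?, pvOrder_items, List.find?]
  repeat' split
  all_goals simp_all
  all_goals (try (intro hc; simp_all))

lemma pvVOf_eq_3 (c : String) : pvVOf c = 3 ↔ pvRank c = "3" := by
  simp only [pvVOf, PySem.Dict.getD, PySem.Dict.get?, pvOrder_items, List.find?]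
  repeat' split
  all_goals simp_all
  all_goals (try (intro hc; simp_all))

lemma pvVOf_eq_4 (c : String) : pvVOf c = 4 ↔ pvRank c = "4" := by
  simp only [pvVOf, PySem.Dict.getD, PySem.Dict.get?, pvOrder_items, List.find?]
  repeat' split
  all_goals simp_all
  all_goals (try (intro hc; simp_all))

lemma pvVOf_eq_5 (c : String) : pvVOf c = 5 ↔ pvRank c = "5" := by
  simp only [pvVOf, PySem.Dict.getD, PySem.Dict.get?, pvOrder_items, List.find?]
  repeat' split
  all_goals simp_all
  all_goals (try (intro hc; simp_all))

lemma pvVOf_eq_6 (c : String) : pvVOf c = 6 ↔ pvRank c = "6" := by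
  simp only [pvVOf, PySem.Dict.getD, PySem.Dict.get?, pvOrder_items, List.find?]
  repeat' split
  all_goals simp_all
  all_goals (try (intro hc; simp_all))

lemma pvVOf_eq_7 (c : String) : pvVOf c = 7 ↔ pvRank c = "7" := by
  simp only [pvVOf, PySem.Dict.getD, PySem.Dict.get?, pvOrder_items, List.find?]
  repeat' split
  all_goals simp_all
  all_goals (try (intro hc; simp_all))

lemma pvVOf_eq_8 (c : String) : pvVOf c = 8 ↔ pvRank c = "8" := by
  simp only [pvVOf, PySem.Dict.getD, PySem.Dict.get?, pvOrder_items, List.find?]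
  repeat' split
  all_goals simp_all
  all_goals (try (intro hc; simp_all))

lemma pvVOf_eq_9 (c : String) : pvVOf c = 9 ↔ pvRank c = "9" := by
  simp only [pvVOf, PySem.Dict.getD, PySem.Dict.get?, pvOrder_items, List.find?]
  repeat' split
  all_goals simp_all
  all_goals (try (intro hc; simp_all))

lemma pvVOf_eq_10 (c : String) : pvVOf c = 10 ↔ pvRank c = "10" := by
  simp only [pvVOf, PySem.Dict.getD, PySem.Dict.get?, pvOrder_items, List.find?]
  repeat' split
  all_goals simp_all
  all_goals (try (intro hc; simp_all))

lemma pvVOf_eq_11 (c : String) : pvVOf c = 11 ↔ pvRank c = "Jack" := by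
  simp only [pvVOf, PySem.Dict.getD, PySem.Dict.get?, pvOrder_items, List.find?]
  repeat' split
  all_goals simp_all
  all_goals (try (intro hc; simp_all))

lemma pvVOf_eq_12 (c : String) : pvVOf c = 12 ↔ pvRank c = "Queen" := by
  simp only [pvVOf, PySem.Dict.getD, PySem.Dict.get?, pvOrder_items, List.find?]
  repeat' split
  all_goals simp_all
  all_goals (try (intro hc; simp_all))

lemma pvVOf_eq_13 (c : String) : pvVOf c = 13 ↔ pvRank c = "King" := by
  simp only [pvVOf, PySem.Dict.getD, PySem.Dict.get?, pvOrder_items, List.find?]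
  repeat' split
  all_goals simp_all
  all_goals (try (intro hc; simp_all))

lemma pvVOf_eq_14 (c : String) : pvVOf c = 14 ↔ pvRank c = "Ace" := by
  simp only [pvVOf, PySem.Dict.getD, PySem.Dict.get?, pvOrder_items, List.find?]
  repeat' split
  all_goals simp_all
  all_goals (try (intro hc; simp_all))

lemma pvVOf_range (c : String) : pvVOf c = 0 ∨ (2 ≤ pvVOf c ∧ pvVOf c ≤ 14) := by
  simp only [pvVOf, PySem.Dict.getD, PySem.Dict.get?, pvOrder_items, List.find?]
  repeat' split
  all_goals simp_all

lemma pvName_vOf (c : String) (h2 : 2 ≤ pvVOf c) (h14 : pvVOf c ≤ 14) :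
    pvName (pvVOf c) = some (pvRank c) := by
  by_cases e2 : pvVOf c = 2
  · rw [e2, (pvVOf_eq_2 c).mp e2]; rfl
  by_cases e3 : pvVOf c = 3
  · rw [e3, (pvVOf_eq_3 c).mp e3]; rfl
  by_cases e4 : pvVOf c = 4
  · rw [e4, (pvVOf_eq_4 c).mp e4]; rfl
  by_cases e5 : pvVOf c = 5
  · rw [e5, (pvVOf_eq_5 c).mp e5]; rfl
  by_cases e6 : pvVOf c = 6
  · rw [e6, (pvVOf_eq_6 c).mp e6]; rfl
  by_cases e7 : pvVOf c = 7
  · rw [e7, (pvVOf_eq_7 c).mp e7]; rfl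
  by_cases e8 : pvVOf c = 8
  · rw [e8, (pvVOf_eq_8 c).mp e8]; rfl
  by_cases e9 : pvVOf c = 9
  · rw [e9, (pvVOf_eq_9 c).mp e9]; rfl
  by_cases e10 : pvVOf c = 10
  · rw [e10, (pvVOf_eq_10 c).mp e10]; rfl
  by_cases e11 : pvVOf c = 11
  · rw [e11, (pvVOf_eq_11 c).mp e11]; rfl
  by_cases e12 : pvVOf c = 12
  · rw [e12, (pvVOf_eq_12 c).mp e12]; rfl
  by_cases e13 : pvVOf c = 13
  · rw [e13, (pvVOf_eq_13 c).mp e13]; rfl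
  by_cases e14 : pvVOf c = 14
  · rw [e14, (pvVOf_eq_14 c).mp e14]; rfl
  omega

lemma pvM_ge (cs : List String) : ∀ v, v ≤ pvM cs v := by
  induction cs with
  | nil => intro v; simp [pvM]
  | cons c cs ih =>
    intro v
    have h := ih (max v (pvVOf c))
    simp only [pvM, List.foldl_cons] at h ⊢
    exact le_trans (le_max_left _ _) h

lemma pvM_le14 (cs : List String) : ∀ v, v ≤ 14 → pvM cs v ≤ 14 := by
  induction cs with
  | nil => intro v h; simpa [pvM] using h
  | cons c cs ih =>
    intro v h
    have hr := pvVOf_range c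
    have h' : max v (pvVOf c) ≤ 14 := by omega
    simpa [pvM, List.foldl_cons] using ih _ h'

lemma pvM_mem (cs : List String) : ∀ v c, c ∈ cs → pvVOf c ≤ pvM cs v := by
  induction cs with
  | nil => intro v c h; cases h
  | cons c0 cs ih =>
    intro v c h
    rcases List.mem_cons.mp h with h | h
    · subst h
      have := pvM_ge cs (max v (pvVOf c))
      simp only [pvM, List.foldl_cons] at *
      exact le_trans (le_max_right _ _) this
    · simpa [pvM, List.foldl_cons] using ih (max v (pvVOf c0)) c h

lemma pvM_exists (cs : List String) : ∀ v, pvM cs v = v ∨ ∃ c ∈ cs, pvVOf c = pvM cs v := by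
  induction cs with
  | nil => intro v; left; simp [pvM]
  | cons c0 cs ih =>
    intro v
    have hstep : pvM (c0 :: cs) v = pvM cs (max v (pvVOf c0)) := by simp [pvM]
    rcases ih (max v (pvVOf c0)) with h | ⟨c, hc, hv⟩
    · by_cases hle : pvVOf c0 ≤ v
      · left; rw [hstep, h]; omega
      · right; exact ⟨c0, List.mem_cons_self, by rw [hstep, h]; omega⟩
    · right; exact ⟨c, List.mem_cons_of_mem _ hc, by rw [hstep]; exact hv⟩

lemma pvMem_iff (cards : List String) (r : String) (k : Int)
    (hiff : ∀ c, pvVOf c = k ↔ pvRank c = r) :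
    r ∈ cards.map pvRank ↔ ∃ c ∈ cards, pvVOf c = k := by
  simp only [List.mem_map]
  constructor
  · rintro ⟨c, hc, hr⟩; exact ⟨c, hc, (hiff c).mpr hr⟩
  · rintro ⟨c, hc, hv⟩; exact ⟨c, hc, (hiff c).mp hv⟩

lemma pvStep_eq (b : Option String) (v : Int) (c : String) :
    pvStep (b, v) c = if v < pvVOf c then (some (pvRank c), pvVOf c) else (b, v) := rfl

lemma pvB_fold (cs : List String) :
    ∀ v b, 0 ≤ v → b = pvName v → cs.foldl pvStep (b, v) = (pvName (pvM cs v), pvM cs v) := by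
  induction cs with
  | nil => intro v b _ hb; simp [pvM, hb]
  | cons c cs ih =>
    intro v b h0 hb
    have hstep : pvM (c :: cs) v = pvM cs (max v (pvVOf c)) := by simp [pvM]
    have hr := pvVOf_range c
    rw [hstep, List.foldl_cons]
    by_cases hlt : v < pvVOf c
    · have hmax : max v (pvVOf c) = pvVOf c := by omega
      have hname : pvName (pvVOf c) = some (pvRank c) := pvName_vOf c (by omega) (by omega)
      rw [pvStep_eq, if_pos hlt, hmax, ih (pvVOf c) _ (by omega) hname.symm]
    · have hmax : max v (pvVOf c) = v := by omega
      rw [pvStep_eq, if_neg hlt, hmax, ih v b h0 hb]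

lemma pvA_eq (cards : List String) : get_high_card cards = pvName (pvM cards 0) := by
  have hub : ∀ c ∈ cards, pvVOf c ≤ pvM cards 0 := fun c hc => pvM_mem cards 0 c hc
  have hge : (0:Int) ≤ pvM cards 0 := pvM_ge cards 0
  have hle : pvM cards 0 ≤ 14 := pvM_le14 cards 0 (by norm_num)
  have hex := pvM_exists cards 0
  have hiff2 := pvMem_iff cards "2" 2 pvVOf_eq_2
  have hiff3 := pvMem_iff cards "3" 3 pvVOf_eq_3
  have hiff4 := pvMem_iff cards "4" 4 pvVOf_eq_4
  have hiff5 := pvMem_iff cards "5" 5 pvVOf_eq_5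
  have hiff6 := pvMem_iff cards "6" 6 pvVOf_eq_6
  have hiff7 := pvMem_iff cards "7" 7 pvVOf_eq_7
  have hiff8 := pvMem_iff cards "8" 8 pvVOf_eq_8
  have hiff9 := pvMem_iff cards "9" 9 pvVOf_eq_9
  have hiff10 := pvMem_iff cards "10" 10 pvVOf_eq_10
  have hiff11 := pvMem_iff cards "Jack" 11 pvVOf_eq_11
  have hiff12 := pvMem_iff cards "Queen" 12 pvVOf_eq_12
  have hiff13 := pvMem_iff cards "King" 13 pvVOf_eq_13
  have hiff14 := pvMem_iff cards "Ace" 14 pvVOf_eq_14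
  simp only [get_high_card, PySem.List.foldl_append_singleton_eq_map, List.nil_append]
  set m := pvM cards 0 with hm
  have hm1 : m ≠ 1 := by
    intro h1
    rcases hex with h | ⟨c, hc, hv⟩
    · omega
    · have := pvVOf_range c; omega
  interval_cases m
  case _ =>  -- m = 0
    have n2 : "2" ∉ cards.map pvRank := by
      rw [hiff2]; rintro ⟨c, hc, hv⟩; have := hub c hc; omega
    have n3 : "3" ∉ cards.map pvRank := by
      rw [hiff3]; rintro ⟨c, hc, hv⟩; have := hub c hc; omega
    have n4 : "4" ∉ cards.map pvRank := by
      rw [hiff4]; rintro ⟨c, hc, hv⟩; have := hub c hc; omega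
    have n5 : "5" ∉ cards.map pvRank := by
      rw [hiff5]; rintro ⟨c, hc, hv⟩; have := hub c hc; omega
    have n6 : "6" ∉ cards.map pvRank := by
      rw [hiff6]; rintro ⟨c, hc, hv⟩; have := hub c hc; omega
    have n7 : "7" ∉ cards.map pvRank := by
      rw [hiff7]; rintro ⟨c, hc, hv⟩; have := hub c hc; omega
    have n8 : "8" ∉ cards.map pvRank := by
      rw [hiff8]; rintro ⟨c, hc, hv⟩; have := hub c hc; omega
    have n9 : "9" ∉ cards.map pvRank := by
      rw [hiff9]; rintro ⟨c, hc, hv⟩; have := hub c hc; omega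
    have n10 : "10" ∉ cards.map pvRank := by
      rw [hiff10]; rintro ⟨c, hc, hv⟩; have := hub c hc; omega
    have n11 : "Jack" ∉ cards.map pvRank := by
      rw [hiff11]; rintro ⟨c, hc, hv⟩; have := hub c hc; omega
    have n12 : "Queen" ∉ cards.map pvRank := by
      rw [hiff12]; rintro ⟨c, hc, hv⟩; have := hub c hc; omega
    have n13 : "King" ∉ cards.map pvRank := by
      rw [hiff13]; rintro ⟨c, hc, hv⟩; have := hub c hc; omega
    have n14 : "Ace" ∉ cards.map pvRank := by
      rw [hiff14]; rintro ⟨c, hc, hv⟩; have := hub c hc; omega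
    simp [pvName, n2, n3, n4, n5, n6, n7, n8, n9, n10, n11, n12, n13, n14]
  case _ => exact absurd rfl hm1  -- m = 1
  case _ =>  -- m = 2
    have n3 : "3" ∉ cards.map pvRank := by
      rw [hiff3]; rintro ⟨c, hc, hv⟩; have := hub c hc; omega
    have n4 : "4" ∉ cards.map pvRank := by
      rw [hiff4]; rintro ⟨c, hc, hv⟩; have := hub c hc; omega
    have n5 : "5" ∉ cards.map pvRank := by
      rw [hiff5]; rintro ⟨c, hc, hv⟩; have := hub c hc; omega
    have n6 : "6" ∉ cards.map pvRank := by
      rw [hiff6]; rintro ⟨c, hc, hv⟩; have := hub c hc; omega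
    have n7 : "7" ∉ cards.map pvRank := by
      rw [hiff7]; rintro ⟨c, hc, hv⟩; have := hub c hc; omega
    have n8 : "8" ∉ cards.map pvRank := by
      rw [hiff8]; rintro ⟨c, hc, hv⟩; have := hub c hc; omega
    have n9 : "9" ∉ cards.map pvRank := by
      rw [hiff9]; rintro ⟨c, hc, hv⟩; have := hub c hc; omega
    have n10 : "10" ∉ cards.map pvRank := by
      rw [hiff10]; rintro ⟨c, hc, hv⟩; have := hub c hc; omega
    have n11 : "Jack" ∉ cards.map pvRank := by
      rw [hiff11]; rintro ⟨c, hc, hv⟩; have := hub c hc; omega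
    have n12 : "Queen" ∉ cards.map pvRank := by
      rw [hiff12]; rintro ⟨c, hc, hv⟩; have := hub c hc; omega
    have n13 : "King" ∉ cards.map pvRank := by
      rw [hiff13]; rintro ⟨c, hc, hv⟩; have := hub c hc; omega
    have n14 : "Ace" ∉ cards.map pvRank := by
      rw [hiff14]; rintro ⟨c, hc, hv⟩; have := hub c hc; omega
    have p : "2" ∈ cards.map pvRank := by
      rw [hiff2]
      rcases hex with h | ⟨c, hc, hv⟩
      · omega
      · exact ⟨c, hc, by omega⟩
    simp [pvName, n3, n4, n5, n6, n7, n8, n9, n10, n11, n12, n13, n14, p]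
  case _ =>  -- m = 3
    have n4 : "4" ∉ cards.map pvRank := by
      rw [hiff4]; rintro ⟨c, hc, hv⟩; have := hub c hc; omega
    have n5 : "5" ∉ cards.map pvRank := by
      rw [hiff5]; rintro ⟨c, hc, hv⟩; have := hub c hc; omega
    have n6 : "6" ∉ cards.map pvRank := by
      rw [hiff6]; rintro ⟨c, hc, hv⟩; have := hub c hc; omega
    have n7 : "7" ∉ cards.map pvRank := by
      rw [hiff7]; rintro ⟨c, hc, hv⟩; have := hub c hc; omega
    have n8 : "8" ∉ cards.map pvRank := by
      rw [hiff8]; rintro ⟨c, hc, hv⟩; have := hub c hc; omega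
    have n9 : "9" ∉ cards.map pvRank := by
      rw [hiff9]; rintro ⟨c, hc, hv⟩; have := hub c hc; omega
    have n10 : "10" ∉ cards.map pvRank := by
      rw [hiff10]; rintro ⟨c, hc, hv⟩; have := hub c hc; omega
    have n11 : "Jack" ∉ cards.map pvRank := by
      rw [hiff11]; rintro ⟨c, hc, hv⟩; have := hub c hc; omega
    have n12 : "Queen" ∉ cards.map pvRank := by
      rw [hiff12]; rintro ⟨c, hc, hv⟩; have := hub c hc; omega
    have n13 : "King" ∉ cards.map pvRank := by
      rw [hiff13]; rintro ⟨c, hc, hv⟩; have := hub c hc; omega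
    have n14 : "Ace" ∉ cards.map pvRank := by
      rw [hiff14]; rintro ⟨c, hc, hv⟩; have := hub c hc; omega
    have p : "3" ∈ cards.map pvRank := by
      rw [hiff3]
      rcases hex with h | ⟨c, hc, hv⟩
      · omega
      · exact ⟨c, hc, by omega⟩
    simp [pvName, n4, n5, n6, n7, n8, n9, n10, n11, n12, n13, n14, p]
  case _ =>  -- m = 4
    have n5 : "5" ∉ cards.map pvRank := by
      rw [hiff5]; rintro ⟨c, hc, hv⟩; have := hub c hc; omega
    have n6 : "6" ∉ cards.map pvRank := by
      rw [hiff6]; rintro ⟨c, hc, hv⟩; have := hub c hc; omega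
    have n7 : "7" ∉ cards.map pvRank := by
      rw [hiff7]; rintro ⟨c, hc, hv⟩; have := hub c hc; omega
    have n8 : "8" ∉ cards.map pvRank := by
      rw [hiff8]; rintro ⟨c, hc, hv⟩; have := hub c hc; omega
    have n9 : "9" ∉ cards.map pvRank := by
      rw [hiff9]; rintro ⟨c, hc, hv⟩; have := hub c hc; omega
    have n10 : "10" ∉ cards.map pvRank := by
      rw [hiff10]; rintro ⟨c, hc, hv⟩; have := hub c hc; omega
    have n11 : "Jack" ∉ cards.map pvRank := by
      rw [hiff11]; rintro ⟨c, hc, hv⟩; have := hub c hc; omega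
    have n12 : "Queen" ∉ cards.map pvRank := by
      rw [hiff12]; rintro ⟨c, hc, hv⟩; have := hub c hc; omega
    have n13 : "King" ∉ cards.map pvRank := by
      rw [hiff13]; rintro ⟨c, hc, hv⟩; have := hub c hc; omega
    have n14 : "Ace" ∉ cards.map pvRank := by
      rw [hiff14]; rintro ⟨c, hc, hv⟩; have := hub c hc; omega
    have p : "4" ∈ cards.map pvRank := by
      rw [hiff4]
      rcases hex with h | ⟨c, hc, hv⟩
      · omega
      · exact ⟨c, hc, by omega⟩
    simp [pvName, n5, n6, n7, n8, n9, n10, n11, n12, n13, n14, p]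
  case _ =>  -- m = 5
    have n6 : "6" ∉ cards.map pvRank := by
      rw [hiff6]; rintro ⟨c, hc, hv⟩; have := hub c hc; omega
    have n7 : "7" ∉ cards.map pvRank := by
      rw [hiff7]; rintro ⟨c, hc, hv⟩; have := hub c hc; omega
    have n8 : "8" ∉ cards.map pvRank := by
      rw [hiff8]; rintro ⟨c, hc, hv⟩; have := hub c hc; omega
    have n9 : "9" ∉ cards.map pvRank := by
      rw [hiff9]; rintro ⟨c, hc, hv⟩; have := hub c hc; omega
    have n10 : "10" ∉ cards.map pvRank := by
      rw [hiff10]; rintro ⟨c, hc, hv⟩; have := hub c hc; omega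
    have n11 : "Jack" ∉ cards.map pvRank := by
      rw [hiff11]; rintro ⟨c, hc, hv⟩; have := hub c hc; omega
    have n12 : "Queen" ∉ cards.map pvRank := by
      rw [hiff12]; rintro ⟨c, hc, hv⟩; have := hub c hc; omega
    have n13 : "King" ∉ cards.map pvRank := by
      rw [hiff13]; rintro ⟨c, hc, hv⟩; have := hub c hc; omega
    have n14 : "Ace" ∉ cards.map pvRank := by
      rw [hiff14]; rintro ⟨c, hc, hv⟩; have := hub c hc; omega
    have p : "5" ∈ cards.map pvRank := by
      rw [hiff5]
      rcases hex with h | ⟨c, hc, hv⟩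
      · omega
      · exact ⟨c, hc, by omega⟩
    simp [pvName, n6, n7, n8, n9, n10, n11, n12, n13, n14, p]
  case _ =>  -- m = 6
    have n7 : "7" ∉ cards.map pvRank := by
      rw [hiff7]; rintro ⟨c, hc, hv⟩; have := hub c hc; omega
    have n8 : "8" ∉ cards.map pvRank := by
      rw [hiff8]; rintro ⟨c, hc, hv⟩; have := hub c hc; omega
    have n9 : "9" ∉ cards.map pvRank := by
      rw [hiff9]; rintro ⟨c, hc, hv⟩; have := hub c hc; omega
    have n10 : "10" ∉ cards.map pvRank := by
      rw [hiff10]; rintro ⟨c, hc, hv⟩; have := hub c hc; omega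
    have n11 : "Jack" ∉ cards.map pvRank := by
      rw [hiff11]; rintro ⟨c, hc, hv⟩; have := hub c hc; omega
    have n12 : "Queen" ∉ cards.map pvRank := by
      rw [hiff12]; rintro ⟨c, hc, hv⟩; have := hub c hc; omega
    have n13 : "King" ∉ cards.map pvRank := by
      rw [hiff13]; rintro ⟨c, hc, hv⟩; have := hub c hc; omega
    have n14 : "Ace" ∉ cards.map pvRank := by
      rw [hiff14]; rintro ⟨c, hc, hv⟩; have := hub c hc; omega
    have p : "6" ∈ cards.map pvRank := by
      rw [hiff6]
      rcases hex with h | ⟨c, hc, hv⟩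
      · omega
      · exact ⟨c, hc, by omega⟩
    simp [pvName, n7, n8, n9, n10, n11, n12, n13, n14, p]
  case _ =>  -- m = 7
    have n8 : "8" ∉ cards.map pvRank := by
      rw [hiff8]; rintro ⟨c, hc, hv⟩; have := hub c hc; omega
    have n9 : "9" ∉ cards.map pvRank := by
      rw [hiff9]; rintro ⟨c, hc, hv⟩; have := hub c hc; omega
    have n10 : "10" ∉ cards.map pvRank := by
      rw [hiff10]; rintro ⟨c, hc, hv⟩; have := hub c hc; omega
    have n11 : "Jack" ∉ cards.map pvRank := by
      rw [hiff11]; rintro ⟨c, hc, hv⟩; have := hub c hc; omega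
    have n12 : "Queen" ∉ cards.map pvRank := by
      rw [hiff12]; rintro ⟨c, hc, hv⟩; have := hub c hc; omega
    have n13 : "King" ∉ cards.map pvRank := by
      rw [hiff13]; rintro ⟨c, hc, hv⟩; have := hub c hc; omega
    have n14 : "Ace" ∉ cards.map pvRank := by
      rw [hiff14]; rintro ⟨c, hc, hv⟩; have := hub c hc; omega
    have p : "7" ∈ cards.map pvRank := by
      rw [hiff7]
      rcases hex with h | ⟨c, hc, hv⟩
      · omega
      · exact ⟨c, hc, by omega⟩
    simp [pvName, n8, n9, n10, n11, n12, n13, n14, p]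
  case _ =>  -- m = 8
    have n9 : "9" ∉ cards.map pvRank := by
      rw [hiff9]; rintro ⟨c, hc, hv⟩; have := hub c hc; omega
    have n10 : "10" ∉ cards.map pvRank := by
      rw [hiff10]; rintro ⟨c, hc, hv⟩; have := hub c hc; omega
    have n11 : "Jack" ∉ cards.map pvRank := by
      rw [hiff11]; rintro ⟨c, hc, hv⟩; have := hub c hc; omega
    have n12 : "Queen" ∉ cards.map pvRank := by
      rw [hiff12]; rintro ⟨c, hc, hv⟩; have := hub c hc; omega
    have n13 : "King" ∉ cards.map pvRank := by
      rw [hiff13]; rintro ⟨c, hc, hv⟩; have := hub c hc; omega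
    have n14 : "Ace" ∉ cards.map pvRank := by
      rw [hiff14]; rintro ⟨c, hc, hv⟩; have := hub c hc; omega
    have p : "8" ∈ cards.map pvRank := by
      rw [hiff8]
      rcases hex with h | ⟨c, hc, hv⟩
      · omega
      · exact ⟨c, hc, by omega⟩
    simp [pvName, n9, n10, n11, n12, n13, n14, p]
  case _ =>  -- m = 9
    have n10 : "10" ∉ cards.map pvRank := by
      rw [hiff10]; rintro ⟨c, hc, hv⟩; have := hub c hc; omega
    have n11 : "Jack" ∉ cards.map pvRank := by
      rw [hiff11]; rintro ⟨c, hc, hv⟩; have := hub c hc; omega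
    have n12 : "Queen" ∉ cards.map pvRank := by
      rw [hiff12]; rintro ⟨c, hc, hv⟩; have := hub c hc; omega
    have n13 : "King" ∉ cards.map pvRank := by
      rw [hiff13]; rintro ⟨c, hc, hv⟩; have := hub c hc; omega
    have n14 : "Ace" ∉ cards.map pvRank := by
      rw [hiff14]; rintro ⟨c, hc, hv⟩; have := hub c hc; omega
    have p : "9" ∈ cards.map pvRank := by
      rw [hiff9]
      rcases hex with h | ⟨c, hc, hv⟩
      · omega
      · exact ⟨c, hc, by omega⟩
    simp [pvName, n10, n11, n12, n13, n14, p]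
  case _ =>  -- m = 10
    have n11 : "Jack" ∉ cards.map pvRank := by
      rw [hiff11]; rintro ⟨c, hc, hv⟩; have := hub c hc; omega
    have n12 : "Queen" ∉ cards.map pvRank := by
      rw [hiff12]; rintro ⟨c, hc, hv⟩; have := hub c hc; omega
    have n13 : "King" ∉ cards.map pvRank := by
      rw [hiff13]; rintro ⟨c, hc, hv⟩; have := hub c hc; omega
    have n14 : "Ace" ∉ cards.map pvRank := by
      rw [hiff14]; rintro ⟨c, hc, hv⟩; have := hub c hc; omega
    have p : "10" ∈ cards.map pvRank := by
      rw [hiff10]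
      rcases hex with h | ⟨c, hc, hv⟩
      · omega
      · exact ⟨c, hc, by omega⟩
    simp [pvName, n11, n12, n13, n14, p]
  case _ =>  -- m = 11
    have n12 : "Queen" ∉ cards.map pvRank := by
      rw [hiff12]; rintro ⟨c, hc, hv⟩; have := hub c hc; omega
    have n13 : "King" ∉ cards.map pvRank := by
      rw [hiff13]; rintro ⟨c, hc, hv⟩; have := hub c hc; omega
    have n14 : "Ace" ∉ cards.map pvRank := by
      rw [hiff14]; rintro ⟨c, hc, hv⟩; have := hub c hc; omega
    have p : "Jack" ∈ cards.map pvRank := by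
      rw [hiff11]
      rcases hex with h | ⟨c, hc, hv⟩
      · omega
      · exact ⟨c, hc, by omega⟩
    simp [pvName, n12, n13, n14, p]
  case _ =>  -- m = 12
    have n13 : "King" ∉ cards.map pvRank := by
      rw [hiff13]; rintro ⟨c, hc, hv⟩; have := hub c hc; omega
    have n14 : "Ace" ∉ cards.map pvRank := by
      rw [hiff14]; rintro ⟨c, hc, hv⟩; have := hub c hc; omega
    have p : "Queen" ∈ cards.map pvRank := by
      rw [hiff12]
      rcases hex with h | ⟨c, hc, hv⟩
      · omega
      · exact ⟨c, hc, by omega⟩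
    simp [pvName, n13, n14, p]
  case _ =>  -- m = 13
    have n14 : "Ace" ∉ cards.map pvRank := by
      rw [hiff14]; rintro ⟨c, hc, hv⟩; have := hub c hc; omega
    have p : "King" ∈ cards.map pvRank := by
      rw [hiff13]
      rcases hex with h | ⟨c, hc, hv⟩
      · omega
      · exact ⟨c, hc, by omega⟩
    simp [pvName, n14, p]
  case _ =>  -- m = 14
    have p : "Ace" ∈ cards.map pvRank := by
      rw [hiff14]
      rcases hex with h | ⟨c, hc, hv⟩
      · omega
      · exact ⟨c, hc, by omega⟩
    simp [pvName, p]

-- ===== VERDICT (by name: the statement is the Claim_ definition above) =====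
theorem get_high_card_spec : Claim_equal_get_high_card := by
  intro cards _
  unfold Spec_get_high_card get_high_card_alt
  rw [pvB_fold cards 0 none (by norm_num) (by rfl), pvA_eq]
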